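-- pv_equiv track=rewrite | github.com/mit4351/Reversi | wx/ReverseCommon.py | has_left_upper_reversible_stone
-- ===== SOURCE A (Python) =====
-- NONE = None # 何も置かれていない
--
-- def has_left_upper_reversible_stone(stone_status, i, j, color):
--     enemy = not(bool(color))
--     if i >= 2 and j >= 2 and stone_status[i-1][j-1] == enemy:
--         k = 2
--         while i - k >= 0 and j - k >= 0:
--             if stone_status[i-k][j-k] == color:
--                 return True
--             elif stone_status[i-k][j-k] == NONE:
--                 break
--             k += 1
--     return False
-- ===== SOURCE B (Python) =====
-- def has_left_upper_reversible_stone(stone_status, i, j, color):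
--     enemy = not bool(color)
--     return any(
--         stone_status[i - k][j - k] == bool(color)
--         and all(stone_status[i - m][j - m] == enemy for m in range(1, k))
--         for k in range(2, min(i, j) + 1)
--     )
-- ===== Notes on version B (the rewrite author's own statement) =====
-- stated objective: alternative
-- what changed: B replaces A's single stateful scan (advance k while seeing enemies, decide at the first other cell) by a declarative brute force over every candidate flip length k: any k with stone_status[i-k][j-k]==color such that all strictly closer diagonal cells are enemy stones; no loop state, a quadratic exists/forall instead of a linear scan.
-- outside the precondition, e.g. on has_left_upper_reversible_stone([[], [None, None]], 2, 2, True): A returns False, B raises IndexError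
import Mathlib
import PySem

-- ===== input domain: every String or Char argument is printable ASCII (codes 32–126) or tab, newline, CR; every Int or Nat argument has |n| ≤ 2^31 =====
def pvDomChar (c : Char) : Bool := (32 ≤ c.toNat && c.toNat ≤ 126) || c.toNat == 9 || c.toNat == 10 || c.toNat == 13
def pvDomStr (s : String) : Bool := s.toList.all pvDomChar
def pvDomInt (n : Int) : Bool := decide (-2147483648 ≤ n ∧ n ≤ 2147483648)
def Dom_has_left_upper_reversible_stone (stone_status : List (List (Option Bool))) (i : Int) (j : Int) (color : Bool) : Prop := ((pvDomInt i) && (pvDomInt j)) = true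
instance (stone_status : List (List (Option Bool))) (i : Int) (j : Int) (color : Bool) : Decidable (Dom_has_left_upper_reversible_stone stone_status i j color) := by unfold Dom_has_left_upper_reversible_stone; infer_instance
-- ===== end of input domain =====

-- B replaces A's stateful scan by a brute force over every candidate flip length k
-- (any k whose cell is color and all closer cells are enemies); objective: alternative.

-- ===== PORT A =====
-- the 'while i - k >= 0 and j - k >= 0' loop of A, state = k
def pvALoop (stone_status : List (List (Option Bool))) (i j : Int) (color : Bool) (k : Int) : Bool :=
  if _h : 0 ≤ i - k ∧ 0 ≤ j - k then
    match (PySem.List.pyGet? stone_status (i - k)).bind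
        (fun row => PySem.List.pyGet? row (j - k)) with
    | none => false    -- IndexError in Python; unreachable under Pre_
    | some cell =>
      if cell == some color then true
      else if cell == none then false     -- 'elif … == NONE: break'
      else pvALoop stone_status i j color (k + 1)
  else false
termination_by (i - k + 1).toNat
decreasing_by omega

def has_left_upper_reversible_stone (stone_status : List (List (Option Bool))) (i : Int) (j : Int) (color : Bool) : Bool :=
  let enemy := !color
  if 2 ≤ i ∧ 2 ≤ j then
    match (PySem.List.pyGet? stone_status (i - 1)).bind
        (fun row => PySem.List.pyGet? row (j - 1)) with
    | none => false    -- IndexError in Python; unreachable under Pre_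
    | some cell =>
      if cell == some enemy then pvALoop stone_status i j color 2 else false
  else false

-- ===== PORT B =====
-- stone_status[i-k][j-k]; none = IndexError in Python, unreachable under Pre_
def pvCellB (stone_status : List (List (Option Bool))) (i j k : Int) : Option (Option Bool) :=
  (PySem.List.pyGet? stone_status (i - k)).bind (fun row => PySem.List.pyGet? row (j - k))

def has_left_upper_reversible_stone_alt (stone_status : List (List (Option Bool))) (i : Int) (j : Int) (color : Bool) : Bool :=
  let enemy := !color
  (PySem.List.pyRange 2 (min i j + 1) 1).any (fun k =>
    (pvCellB stone_status i j k == some (some color)) &&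
    (PySem.List.pyRange 1 k 1).all (fun m =>
      pvCellB stone_status i j m == some (some enemy)))

-- ===== PRECONDITION & SPEC =====
-- Pre_ excludes ragged/too-short boards on which indexing the diagonal may raise IndexError;
-- A can still return on some of these when its loop stops before reaching a short row (see cites).
def Pre_has_left_upper_reversible_stone (stone_status : List (List (Option Bool))) (i : Int) (j : Int) (color : Bool) : Prop :=
  (2 ≤ i ∧ 2 ≤ j) → (i ≤ (stone_status.length : Int) ∧ ∀ row ∈ stone_status, j ≤ (row.length : Int))
instance (stone_status : List (List (Option Bool))) (i : Int) (j : Int) (color : Bool) : Decidable (Pre_has_left_upper_reversible_stone stone_status i j color) := by unfold Pre_has_left_upper_reversible_stone; infer_instance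

def pvWitness_has_left_upper_reversible_stone : List (List (Option Bool)) × Int × Int × Bool :=
  ([[some true, some false], [some false, some false]], 2, 2, true)

def Spec_has_left_upper_reversible_stone (stone_status : List (List (Option Bool))) (i : Int) (j : Int) (color : Bool) (out : Bool) : Prop := out = has_left_upper_reversible_stone_alt stone_status i j color
instance (stone_status : List (List (Option Bool))) (i : Int) (j : Int) (color : Bool) (out : Bool) : Decidable (Spec_has_left_upper_reversible_stone stone_status i j color out) := by unfold Spec_has_left_upper_reversible_stone; infer_instance

-- ===== CLAIM =====
def Claim_equal_has_left_upper_reversible_stone : Prop := ∀ (stone_status : List (List (Option Bool))) (i : Int) (j : Int) (color : Bool), Dom_has_left_upper_reversible_stone stone_status i j color → Pre_has_left_upper_reversible_stone stone_status i j color → Spec_has_left_upper_reversible_stone stone_status i j color (has_left_upper_reversible_stone stone_status i j color)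

-- ===== LEMMAS AND PROOFS =====

-- in-range double lookup succeeds
lemma pvCell_some (ss : List (List (Option Bool))) (i j m : Int)
    (hlen : i ≤ (ss.length : Int)) (hrow : ∀ row ∈ ss, j ≤ (row.length : Int))
    (h1 : 1 ≤ m) (hi : m ≤ i) (hj : m ≤ j) :
    ∃ cell, pvCellB ss i j m = some cell := by
  unfold pvCellB
  have h0 : (0:Int) ≤ i - m := by omega
  have h2 : i - m < (ss.length : Int) := by omega
  rw [PySem.List.pyGet?_eq_some_getElem ss h0 h2]
  have hmem : ss[(i - m).toNat] ∈ ss := List.getElem_mem _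
  have hrl := hrow _ hmem
  have h3 : (0:Int) ≤ j - m := by omega
  have h4 : j - m < (ss[(i - m).toNat].length : Int) := by omega
  rw [Option.bind_some, PySem.List.pyGet?_eq_some_getElem _ h3 h4]
  exact ⟨_, rfl⟩

-- under the enemy-prefix hypothesis the inner 'all' of B is true
lemma pvAll_true (ss : List (List (Option Bool))) (i j k : Int) (color : Bool)
    (hyp : ∀ m, 1 ≤ m → m < k → pvCellB ss i j m = some (some (!color))) :
    (PySem.List.pyRange 1 k 1).all (fun m =>
      pvCellB ss i j m == some (some (!color))) = true := by
  rw [List.all_eq_true]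
  intro m hm
  rw [PySem.List.mem_pyRange_one] at hm
  simp [hyp m hm.1 hm.2]

-- unfold one loop step when the lookup succeeds
lemma pvALoop_step (ss : List (List (Option Bool))) (i j : Int) (color : Bool) (k : Int)
    (h : 0 ≤ i - k ∧ 0 ≤ j - k) {c : Option Bool} (hc : pvCellB ss i j k = some c) :
    pvALoop ss i j color k =
      (if c == some color then true
       else if c == none then false
       else pvALoop ss i j color (k + 1)) := by
  rw [pvALoop, dif_pos h]
  have hc' : ((PySem.List.pyGet? ss (i - k)).bind
      (fun row => PySem.List.pyGet? row (j - k))) = some c := hc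
  rw [hc']

-- core: A's while-loop from k equals B's 'any' restricted to candidates ≥ k,
-- given all cells strictly before k are enemy stones
lemma pvLoop_eq_any (ss : List (List (Option Bool))) (i j : Int) (color : Bool)
    (hlen : i ≤ (ss.length : Int)) (hrow : ∀ row ∈ ss, j ≤ (row.length : Int)) :
    ∀ f : Nat, ∀ k : Int, 2 ≤ k → (min i j + 1 - k).toNat ≤ f →
      (∀ m, 1 ≤ m → m < k → pvCellB ss i j m = some (some (!color))) →
      pvALoop ss i j color k =
        (PySem.List.pyRange k (min i j + 1) 1).any (fun k' =>
          (pvCellB ss i j k' == some (some color)) &&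
          (PySem.List.pyRange 1 k' 1).all (fun m =>
            pvCellB ss i j m == some (some (!color)))) := by
  intro f
  induction f with
  | zero =>
    intro k hk hf hyp
    have hkn : min i j + 1 ≤ k := by omega
    rw [PySem.List.pyRange_one_eq_nil hkn, pvALoop]
    rw [dif_neg (by omega : ¬ (0 ≤ i - k ∧ 0 ≤ j - k))]; simp
  | succ f ih =>
    intro k hk hf hyp
    by_cases hkn : k ≤ min i j
    · obtain ⟨cell, hcell⟩ := pvCell_some ss i j k hlen hrow (by omega) (by omega) (by omega)
      have hcell' : ((PySem.List.pyGet? ss (i - k)).bind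
          (fun row => PySem.List.pyGet? row (j - k))) = some cell := hcell
      rw [pvALoop_step ss i j color k (by omega) hcell]
      cases cell with
      | none =>
        -- A breaks; B: candidate k fails (not color), every k' > k fails its 'all' at m = k
        simp only [beq_iff_eq, reduceCtorEq, if_false, beq_self_eq_true, if_true]
        symm
        rw [List.any_eq_false]
        intro k' hk'
        rw [PySem.List.mem_pyRange_one] at hk'
        by_cases hk'' : k' = k
        · subst hk''; simp [hcell]
        · have hall : ((PySem.List.pyRange 1 k' 1).all (fun m =>
              pvCellB ss i j m == some (some (!color)))) = false := by
            rw [List.all_eq_false]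
            exact ⟨k, by rw [PySem.List.mem_pyRange_one]; omega, by simp [hcell]⟩
          simp [hall]
      | some b =>
        rw [PySem.List.pyRange_one_cons (by omega : k < min i j + 1), List.any_cons]
        by_cases hb : b = color
        · have e1 : ((some b : Option Bool) == some color) = true := by rw [hb]; simp
          rw [if_pos e1]
          have hh : (pvCellB ss i j k == some (some color)) = true := by
            rw [hcell, hb]; simp
          rw [hh, pvAll_true ss i j k color hyp]; simp
        · have hb' : b = !color := by cases b <;> cases color <;> simp_all
          subst hb'
          have e1 : ((some (!color) : Option Bool) == some color) = false := by
            cases color <;> rfl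
          rw [if_neg (by simp [e1]), if_neg (by simp)]
          have hh : (pvCellB ss i j k == some (some color)) = false := by
            rw [hcell]; cases color <;> rfl
          rw [hh]
          simp only [Bool.false_and, Bool.false_or]
          exact ih (k + 1) (by omega) (by omega)
            (fun m h1 h2 => by
              by_cases hm : m = k
              · subst hm; exact hcell
              · exact hyp m h1 (by omega))
    · rw [PySem.List.pyRange_one_eq_nil (by omega : min i j + 1 ≤ k), pvALoop]
      rw [dif_neg (by omega : ¬ (0 ≤ i - k ∧ 0 ≤ j - k))]; simp

-- ===== VERDICT =====
theorem has_left_upper_reversible_stone_spec : Claim_equal_has_left_upper_reversible_stone := by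
  intro ss i j color _ hpre
  unfold Spec_has_left_upper_reversible_stone
  unfold has_left_upper_reversible_stone has_left_upper_reversible_stone_alt
  by_cases hg : 2 ≤ i ∧ 2 ≤ j
  · obtain ⟨hlen, hrow⟩ := hpre hg
    rw [if_pos hg]
    obtain ⟨cell0, hcell0⟩ := pvCell_some ss i j 1 hlen hrow le_rfl (by omega) (by omega)
    have hcell0' : ((PySem.List.pyGet? ss (i - 1)).bind
        (fun row => PySem.List.pyGet? row (j - 1))) = some cell0 := hcell0
    rw [hcell0']
    by_cases he : cell0 = some (!color)
    · subst he
      simp only [beq_self_eq_true, if_true]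
      refine (pvLoop_eq_any ss i j color hlen hrow _ 2 le_rfl le_rfl ?_)
      intro m h1 h2
      have hm : m = 1 := by omega
      subst hm; exact hcell0
    · -- adjacent cell is not an enemy: A is false; every candidate of B fails its 'all' at m = 1
      have h1 : (cell0 == some (!color)) = false := by simp [he]
      simp only [h1, Bool.false_eq_true, if_false]
      symm
      rw [List.any_eq_false]
      intro k' hk'
      rw [PySem.List.mem_pyRange_one] at hk'
      have hall : ((PySem.List.pyRange 1 k' 1).all (fun m =>
          pvCellB ss i j m == some (some (!color)))) = false := by
        rw [List.all_eq_false]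
        exact ⟨1, by rw [PySem.List.mem_pyRange_one]; omega, by simp [hcell0, he]⟩
      simp [hall]
  · have hn : min i j + 1 ≤ 2 := by omega
    rw [if_neg hg, PySem.List.pyRange_one_eq_nil hn]
    simp
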